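-- pv_equiv track=rewrite | github.com/Ashiq-am/Path-of-Python | 3.Data Types/Arrays Set 1 and Set 2/Prefix Sum/Bitwise OR of sum of all subsequences of an array/Bitwise OR of sum of all subsequences of an array.py | findOR
-- ===== SOURCE A (Python) =====
-- def findOR(nums, N):
--
-- 	# Stores the prefix
-- 	# sum of nums[]
-- 	prefix_sum = 0
--
-- 	# Stores the bitwise OR of
-- 	# sum of each subsequence
-- 	result = 0
--
-- 	# Iterate through array nums[]
-- 	for i in range(N):
--
-- 		# Bits set in nums[i] are
-- 		# also set in result
-- 		result |= nums[i]
--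
-- 		# Calculate prefix_sum
-- 		prefix_sum += nums[i]
--
-- 		# Bits set in prefix_sum
-- 		# are also set in result
-- 		result |= prefix_sum
--
-- 	# Return the result
-- 	return result
-- ===== SOURCE B (Python) =====
-- def findOR(nums, N):
--     # Two-pass, reverse traversal: first compute the full sum of the first N
--     # elements; then walk i = N-1 .. 0, ORing nums[i] and the current total
--     # (which at step i equals the prefix sum nums[0]+..+nums[i]), and peel
--     # nums[i] off the total by subtraction.
--     total = 0
--     for i in range(N):
--         total += nums[i]
--     result = 0
--     for i in range(N - 1, -1, -1):
--         result |= nums[i] | total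
--         total -= nums[i]
--     return result
-- ===== Notes on version B (the rewrite author's own statement) =====
-- stated objective: alternative
-- what changed: A accumulates prefix sums forward in one interleaved loop; B instead makes a summing pass and then traverses the indices BACKWARD, recovering each prefix sum by subtracting elements off the running total, so no prefix sum is ever built up.
import Mathlib
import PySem

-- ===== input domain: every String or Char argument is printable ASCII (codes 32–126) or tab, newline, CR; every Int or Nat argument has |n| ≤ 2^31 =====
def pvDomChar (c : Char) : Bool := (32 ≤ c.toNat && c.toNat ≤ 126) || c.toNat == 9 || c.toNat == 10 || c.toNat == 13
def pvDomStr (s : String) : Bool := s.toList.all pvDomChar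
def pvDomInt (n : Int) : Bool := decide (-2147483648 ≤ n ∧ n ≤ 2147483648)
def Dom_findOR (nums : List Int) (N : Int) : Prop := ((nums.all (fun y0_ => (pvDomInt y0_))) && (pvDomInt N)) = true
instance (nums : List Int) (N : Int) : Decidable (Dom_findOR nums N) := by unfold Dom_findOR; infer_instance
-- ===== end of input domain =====

-- B replaces A's forward interleaved prefix-sum loop by a two-pass reverse traversal:
-- sum the first N elements once, then walk i = N-1..0 recovering each prefix sum by
-- subtraction from the running total; same O(N) cost.


-- ===== PORT A =====
-- 'nums[i]' is ported as pyGetD with default 0; Pre_findOR guarantees every index is in range,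
-- so the default is never read (Python raises IndexError exactly where Pre_findOR fails).
def findOR (nums : List Int) (N : Int) : Int :=
  ((PySem.List.pyRange 0 N 1).foldl
    (fun (st : Int × Int) i =>
      let x := PySem.List.pyGetD nums i 0
      let result := PySem.Int.bor st.1 x
      let prefix_sum := st.2 + x
      (PySem.Int.bor result prefix_sum, prefix_sum))
    (0, 0)).1

-- ===== PORT B =====
-- total = sum of first N elements; then for i in range(N-1, -1, -1):
--   result |= nums[i] | total; total -= nums[i].
def findOR_alt (nums : List Int) (N : Int) : Int :=
  let total := (PySem.List.pyRange 0 N 1).foldl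
    (fun t i => t + PySem.List.pyGetD nums i 0) 0
  ((PySem.List.pyRange (N - 1) (-1) (-1)).foldl
    (fun (st : Int × Int) i =>
      (PySem.Int.bor st.1 (PySem.Int.bor (PySem.List.pyGetD nums i 0) st.2),
       st.2 - PySem.List.pyGetD nums i 0))
    (0, total)).1

-- ===== PRECONDITION & SPEC =====
-- Pre_ excludes exactly the inputs where Python A raises IndexError (N > len(nums));
-- B's first loop raises there too. Negative or zero N is fine (empty ranges, result 0).
def Pre_findOR (nums : List Int) (N : Int) : Prop := N ≤ (nums.length : Int)
instance (nums : List Int) (N : Int) : Decidable (Pre_findOR nums N) := by unfold Pre_findOR; infer_instance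
def pvWitness_findOR : List Int × Int := ([3, -5, 12], 3)

def Spec_findOR (nums : List Int) (N : Int) (out : Int) : Prop := out = findOR_alt nums N
instance (nums : List Int) (N : Int) (out : Int) : Decidable (Spec_findOR nums N out) := by unfold Spec_findOR; infer_instance

-- ===== CLAIM (what is proved, stated in full; the proofs are below) =====
def Claim_equal_findOR : Prop := ∀ (nums : List Int) (N : Int), Dom_findOR nums N → Pre_findOR nums N → Spec_findOR nums N (findOR nums N)

-- ===== LEMMAS AND PROOFS =====

-- `n - (n &&& m)` (how PySem.Int.bor writes the negative branch) is Nat.ldiff.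
theorem sub_and_eq_ldiff (n m : Nat) : n - (n &&& m) = Nat.ldiff n m := by
  induction n using Nat.binaryRec generalizing m with
  | zero =>
    have : Nat.ldiff 0 m = 0 := Nat.zero_of_testBit_eq_false (by intro i; simp [Nat.testBit_ldiff])
    simp [this]
  | bit a n ih =>
    rw [← Nat.bit_testBit_zero_shiftRight_one m]
    rw [Nat.land_bit, Nat.ldiff_bit, Nat.bit_val, Nat.bit_val, Nat.bit_val, ← ih]
    have h : n &&& (m >>> 1) ≤ n := Nat.and_le_left
    cases a <;> cases m.testBit 0 <;> simp <;> omega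

theorem bor_eq_lor (a b : Int) : PySem.Int.bor a b = Int.lor a b := by
  rcases a with m | m <;> rcases b with n | n <;>
    simp [PySem.Int.bor, Int.lor, Int.negSucc_eq, sub_and_eq_ldiff] <;> omega

theorem int_lor_assoc (a b c : Int) : Int.lor (Int.lor a b) c = Int.lor a (Int.lor b c) := by
  rcases a with m | m <;> rcases b with n | n <;> rcases c with k | k <;>
    simp only [Int.lor] <;> congr 1 <;>
    refine Nat.eq_of_testBit_eq (fun i => ?_) <;>
    simp only [Nat.testBit_lor, Nat.testBit_land, Nat.testBit_ldiff] <;>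
    cases Nat.testBit m i <;> cases Nat.testBit n i <;> cases Nat.testBit k i <;> simp

theorem bor_assoc (a b c : Int) : PySem.Int.bor (PySem.Int.bor a b) c = PySem.Int.bor a (PySem.Int.bor b c) := by
  simp [bor_eq_lor, int_lor_assoc]

theorem bor_left_comm (a b c : Int) :
    PySem.Int.bor a (PySem.Int.bor b c) = PySem.Int.bor b (PySem.Int.bor a c) := by
  rw [← bor_assoc, PySem.Int.bor_comm a b, bor_assoc]

theorem zero_bor (a : Int) : PySem.Int.bor 0 a = a := by
  rw [PySem.Int.bor_comm]; exact PySem.Int.bor_zero a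

-- prefix sums of a list starting from p (proof-only characterisation)
def pref : List Int → Int → List Int
  | [], _ => []
  | x :: t, p => (p + x) :: pref t (p + x)

-- pull the init out of an OR fold
theorem foldl_bor_pull (l : List Int) (r : Int) :
    l.foldl (fun a v => PySem.Int.bor a v) r
      = PySem.Int.bor r (l.foldl (fun a v => PySem.Int.bor a v) 0) := by
  induction l generalizing r with
  | nil => simp [PySem.Int.bor_zero]
  | cons x t ih =>
    simp only [List.foldl_cons]
    rw [ih (PySem.Int.bor r x), ih (PySem.Int.bor 0 x), zero_bor, bor_assoc]

theorem foldl_bor_append (l m : List Int) :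
    (l ++ m).foldl (fun a v => PySem.Int.bor a v) 0
      = PySem.Int.bor (l.foldl (fun a v => PySem.Int.bor a v) 0)
                      (m.foldl (fun a v => PySem.Int.bor a v) 0) := by
  rw [List.foldl_append, foldl_bor_pull]

-- A's interleaved fold, characterised by the element list and its prefix sums
theorem foldA_eq (nums : List Int) (L : List Int) (r p : Int) :
    (L.foldl (fun (st : Int × Int) i =>
        (PySem.Int.bor (PySem.Int.bor st.1 (PySem.List.pyGetD nums i 0)) (st.2 + PySem.List.pyGetD nums i 0),
         st.2 + PySem.List.pyGetD nums i 0)) (r, p)).1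
      = PySem.Int.bor r
          ((L.map (fun i => PySem.List.pyGetD nums i 0)
              ++ pref (L.map (fun i => PySem.List.pyGetD nums i 0)) p).foldl
            (fun a v => PySem.Int.bor a v) 0) := by
  induction L generalizing r p with
  | nil => simp [pref, PySem.Int.bor_zero]
  | cons i t ih =>
    simp only [List.foldl_cons, List.map_cons, pref, List.cons_append]
    rw [ih]
    have h : t.map (fun i => PySem.List.pyGetD nums i 0)
          ++ (p + PySem.List.pyGetD nums i 0)
             :: pref (t.map (fun i => PySem.List.pyGetD nums i 0)) (p + PySem.List.pyGetD nums i 0)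
        = (t.map (fun i => PySem.List.pyGetD nums i 0) ++ [p + PySem.List.pyGetD nums i 0])
          ++ pref (t.map (fun i => PySem.List.pyGetD nums i 0)) (p + PySem.List.pyGetD nums i 0) := by
      simp
    rw [foldl_bor_pull _ (PySem.Int.bor 0 (PySem.List.pyGetD nums i 0)), h,
        foldl_bor_append, foldl_bor_append, zero_bor]
    simp only [foldl_bor_append, List.foldl_cons, List.foldl_nil, zero_bor]
    simp only [bor_assoc, bor_left_comm, PySem.Int.bor_comm]

-- B's reverse loop over the index list, as a foldr: starting from total
-- p + sum of the selected elements, it ORs together all selected elements and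
-- all their prefix sums above p, and leaves total p.
theorem foldB_eq (nums : List Int) (L : List Int) (r p : Int) :
    L.foldr (fun i (st : Int × Int) =>
        (PySem.Int.bor st.1 (PySem.Int.bor (PySem.List.pyGetD nums i 0) st.2),
         st.2 - PySem.List.pyGetD nums i 0))
      (r, p + (L.map (fun i => PySem.List.pyGetD nums i 0)).sum)
      = (PySem.Int.bor r
          ((L.map (fun i => PySem.List.pyGetD nums i 0)
              ++ pref (L.map (fun i => PySem.List.pyGetD nums i 0)) p).foldl
            (fun a v => PySem.Int.bor a v) 0), p) := by
  induction L generalizing r p with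
  | nil => simp [pref, PySem.Int.bor_zero]
  | cons i t ih =>
    simp only [List.foldr_cons, List.map_cons, List.sum_cons]
    have h : p + (PySem.List.pyGetD nums i 0 + (t.map (fun i => PySem.List.pyGetD nums i 0)).sum)
        = (p + PySem.List.pyGetD nums i 0) + (t.map (fun i => PySem.List.pyGetD nums i 0)).sum := by ring
    rw [h, ih r (p + PySem.List.pyGetD nums i 0)]
    simp only [pref, List.cons_append, List.foldl_cons, Prod.mk.injEq]
    constructor
    · have h2 : t.map (fun i => PySem.List.pyGetD nums i 0)
            ++ (p + PySem.List.pyGetD nums i 0)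
               :: pref (t.map (fun i => PySem.List.pyGetD nums i 0)) (p + PySem.List.pyGetD nums i 0)
          = (t.map (fun i => PySem.List.pyGetD nums i 0) ++ [p + PySem.List.pyGetD nums i 0])
            ++ pref (t.map (fun i => PySem.List.pyGetD nums i 0)) (p + PySem.List.pyGetD nums i 0) := by
        simp
      rw [foldl_bor_pull _ (PySem.Int.bor 0 (PySem.List.pyGetD nums i 0)), h2,
          foldl_bor_append, foldl_bor_append, zero_bor]
      simp only [foldl_bor_append, List.foldl_cons, List.foldl_nil, zero_bor]
      simp only [bor_assoc, bor_left_comm, PySem.Int.bor_comm]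
    · ring

-- ===== VERDICT (by name: the statement is the Claim_ definition above) =====
theorem findOR_spec : Claim_equal_findOR := by
  intro nums N _ _
  show findOR nums N = findOR_alt nums N
  simp only [findOR, findOR_alt]
  rw [foldA_eq, zero_bor]
  rw [PySem.List.foldl_add]
  have hrev : PySem.List.pyRange (N - 1) (-1) (-1) = (PySem.List.pyRange 0 N 1).reverse := by
    rw [PySem.List.pyRange_neg_one_eq_reverse]
    norm_num
  rw [hrev, List.foldl_reverse, foldB_eq nums _ 0 0, zero_bor]
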